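-- pv_equiv track=rewrite | github.com/giyeon-dev/mysql-log-ai-assistant | log_parser.py | parse_log_file
-- ===== SOURCE A (Python) =====
-- def parse_log_file(log_text: str, max_chunk_lines: int = 30) -> list:
--     """
--     Parses the MySQL log content into smaller chunks suitable for LLM analysis.
--
--     Parameters:
--         log_text (str): Full content of the uploaded MySQL log.
--         max_chunk_lines (int): Number of lines per chunk (default: 30).
--
--     Returns:
--         List[str]: List of log chunks (each a multi-line string).
--     """
--     # 1. Split the log into lines
--     lines = log_text.splitlines()
--
--     # 2. Filter out empty lines and comments
--     clean_lines = [line for line in lines if line.strip() and not line.strip().startswith('#')]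
--
--     # 3. Group lines into chunks of max_chunk_lines
--     chunks = []
--     for i in range(0, len(clean_lines), max_chunk_lines):
--         chunk = "\n".join(clean_lines[i:i + max_chunk_lines])
--         chunks.append(chunk)
--
--     return chunks
-- ===== SOURCE B (Python) =====
-- def parse_log_file(log_text: str, max_chunk_lines: int = 30) -> list:
--     """Single streaming pass: filter and chunk in one loop over the lines."""
--     chunks = []
--     buf = []
--     for line in log_text.splitlines():
--         s = line.strip()
--         if s and not s.startswith('#'):
--             buf.append(line)
--             if len(buf) == max_chunk_lines:
--                 chunks.append("\n".join(buf))
--                 buf = []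
--     if buf:
--         chunks.append("\n".join(buf))
--     return chunks
-- ===== Notes on version B (the rewrite author's own statement) =====
-- stated objective: simpler
-- what changed: B replaces A's filter-into-a-list followed by index/slice chunking over range() with a single streaming pass that keeps a line buffer and flushes it as a chunk whenever it reaches max_chunk_lines.
-- outside the precondition, e.g. on parse_log_file('a\nb\nc', -1): A returns [], B returns ['a\nb\nc']; on parse_log_file('a\nb', 0): A raises ValueError, B returns ['a\nb']
import Mathlib
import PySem

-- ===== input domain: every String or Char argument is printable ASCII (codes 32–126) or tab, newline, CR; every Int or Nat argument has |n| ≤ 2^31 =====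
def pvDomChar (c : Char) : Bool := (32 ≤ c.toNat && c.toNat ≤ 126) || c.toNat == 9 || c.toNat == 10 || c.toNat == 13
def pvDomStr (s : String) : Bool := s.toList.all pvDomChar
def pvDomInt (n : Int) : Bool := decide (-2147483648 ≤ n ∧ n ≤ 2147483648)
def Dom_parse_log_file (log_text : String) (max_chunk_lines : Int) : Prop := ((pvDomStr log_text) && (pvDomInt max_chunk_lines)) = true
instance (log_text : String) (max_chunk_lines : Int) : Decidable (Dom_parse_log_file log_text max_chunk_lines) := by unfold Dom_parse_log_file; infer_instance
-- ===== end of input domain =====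

-- B replaces A's filter-then-index-slice with a single streaming pass (buffer + flush); objective: simpler one-pass decomposition, same asymptotic cost.


-- ===== PORT A =====
def parse_log_file (log_text : String) (max_chunk_lines : Int) : List String :=
  let lines := PySem.Str.splitlines log_text
  let clean_lines := lines.filter (fun line =>
    decide (PySem.Str.strip line ≠ "") && !PySem.Str.startswith (PySem.Str.strip line) "#")
  (PySem.List.pyRange 0 (clean_lines.length : Int) max_chunk_lines).foldl
    (fun chunks i =>
      chunks ++ [PySem.Str.join "\n" (PySem.List.slice clean_lines (some i) (some (i + max_chunk_lines)))])
    []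

-- ===== PORT B =====
def parse_log_file_alt (log_text : String) (max_chunk_lines : Int) : List String :=
  let step := fun (st : List String × List String) (line : String) =>
    let s := PySem.Str.strip line
    if decide (s ≠ "") && !PySem.Str.startswith s "#" then
      let buf := st.1 ++ [line]
      if (buf.length : Int) = max_chunk_lines then ([], st.2 ++ [PySem.Str.join "\n" buf])
      else (buf, st.2)
    else st
  let r := (PySem.Str.splitlines log_text).foldl step ([], [])
  if r.1 ≠ [] then r.2 ++ [PySem.Str.join "\n" r.1] else r.2

-- ===== PRECONDITION & SPEC =====
-- Pre_ excludes max_chunk_lines = 0, where A's range(..., 0) raises ValueError, and negative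
-- max_chunk_lines on logs with at least one kept line, where the chunk size is nonsense and
-- neither value is specified: A's empty range accidentally yields [] while a streaming pass
-- flushes the kept lines as one chunk.  (Negative max_chunk_lines with no kept line is
-- admitted: both programs return [].)
def Pre_parse_log_file (log_text : String) (max_chunk_lines : Int) : Prop :=
  1 ≤ max_chunk_lines ∨
    ((PySem.Str.splitlines log_text).filter (fun line =>
        decide (PySem.Str.strip line ≠ "") && !PySem.Str.startswith (PySem.Str.strip line) "#") = []
      ∧ max_chunk_lines ≠ 0)
instance (log_text : String) (max_chunk_lines : Int) : Decidable (Pre_parse_log_file log_text max_chunk_lines) := by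
  unfold Pre_parse_log_file; infer_instance

def pvWitness_parse_log_file : String × Int := ("a\n#skip\n\nb\nc", 2)

def Spec_parse_log_file (log_text : String) (max_chunk_lines : Int) (out : List String) : Prop :=
  out = parse_log_file_alt log_text max_chunk_lines
instance (log_text : String) (max_chunk_lines : Int) (out : List String) : Decidable (Spec_parse_log_file log_text max_chunk_lines out) := by
  unfold Spec_parse_log_file; infer_instance

-- ===== CLAIM (what is proved, stated in full; the proofs are below) =====
def Claim_equal_parse_log_file : Prop := ∀ (log_text : String) (max_chunk_lines : Int), Dom_parse_log_file log_text max_chunk_lines → Pre_parse_log_file log_text max_chunk_lines → Spec_parse_log_file log_text max_chunk_lines (parse_log_file log_text max_chunk_lines)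
-- ===== LEMMAS AND PROOFS =====

-- the kept-line test shared by both programs
def pvKeep (line : String) : Bool :=
  decide (PySem.Str.strip line ≠ "") && !PySem.Str.startswith (PySem.Str.strip line) "#"

-- B's streaming chunker, on the already-filtered lines (proof-side model of B's loop)
def pvChunkAux (k : Int) (buf : List String) : List String → List String
  | [] => if buf ≠ [] then [PySem.Str.join "\n" buf] else []
  | x :: xs =>
    if ((buf ++ [x]).length : Int) = k then
      PySem.Str.join "\n" (buf ++ [x]) :: pvChunkAux k [] xs
    else pvChunkAux k (buf ++ [x]) xs

lemma pvB_fold (k : Int) :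
    ∀ (lines buf chunks : List String),
      (let r := lines.foldl (fun (st : List String × List String) (line : String) =>
          let s := PySem.Str.strip line
          if decide (s ≠ "") && !PySem.Str.startswith s "#" then
            let buf := st.1 ++ [line]
            if (buf.length : Int) = k then ([], st.2 ++ [PySem.Str.join "\n" buf])
            else (buf, st.2)
          else st) (buf, chunks);
        if r.1 ≠ [] then r.2 ++ [PySem.Str.join "\n" r.1] else r.2)
      = chunks ++ pvChunkAux k buf (lines.filter pvKeep) := by
  intro lines
  induction lines with
  | nil =>
    intro buf chunks
    simp only [List.foldl_nil, List.filter_nil, pvChunkAux]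
    split_ifs <;> simp
  | cons x xs ih =>
    intro buf chunks
    by_cases hx : pvKeep x
    · have hx' : (decide (PySem.Str.strip x ≠ "") && !PySem.Str.startswith (PySem.Str.strip x) "#") = true := hx
      simp only [List.foldl_cons, List.filter_cons, hx, if_pos, hx']
      by_cases hlen : (((buf ++ [x]).length : Int) = k)
      · simp only [hlen, if_pos, pvChunkAux, ih]
        simp [pvChunkAux]
      · simp only [hlen, pvChunkAux, ih]
        simp [pvChunkAux]
    · have hx' : (decide (PySem.Str.strip x ≠ "") && !PySem.Str.startswith (PySem.Str.strip x) "#") = false := by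
        simpa [pvKeep] using hx
      simp only [List.foldl_cons, List.filter_cons, hx', if_neg, Bool.false_eq_true,
        not_false_iff, ih]
      simp [hx]

-- streaming chunker = chunks read off by index arithmetic
lemma pvChunkAux_eq_map (k' : Nat) (hk : 0 < k') :
    ∀ (n : Nat) (l buf : List String), l.length ≤ n → buf.length < k' →
      pvChunkAux (k' : Int) buf l
        = (List.range ((buf.length + l.length + k' - 1) / k')).map
            (fun j => PySem.Str.join "\n" (((buf ++ l).drop (k' * j)).take k')) := by
  intro n
  induction n with
  | zero =>
    intro l buf hl hb
    have hl0 : l = [] := by cases l with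
      | nil => rfl
      | cons a as => simp at hl
    subst hl0
    simp only [pvChunkAux, List.length_nil, List.append_nil]
    by_cases hbuf : buf = []
    · subst hbuf
      have h0 : (([] : List String).length + 0 + k' - 1) / k' = 0 :=
        Nat.div_eq_of_lt (by simp; omega)
      rw [h0]
      simp
    · have hb1 : 1 ≤ buf.length := by cases buf with
        | nil => exact absurd rfl hbuf
        | cons a as => simp
      have hdiv : (buf.length + 0 + k' - 1) / k' = 1 :=
        Nat.div_eq_of_lt_le (by omega) (by omega)
      rw [hdiv]
      simp [hbuf, List.take_of_length_le (Nat.le_of_lt hb)]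
  | succ n ih =>
    intro l buf hl hb
    cases l with
    | nil =>
      have := ih [] buf (by simp) hb
      simpa using this
    | cons x xs =>
      simp only [pvChunkAux]
      by_cases hlen : (((buf ++ [x]).length : Int) = (k' : Int))
      · have hlenN : buf.length + 1 = k' := by
          have := hlen
          simp only [List.length_append, List.length_cons, List.length_nil] at this
          exact_mod_cast this
        rw [if_pos hlen]
        rw [ih xs [] (by simp at hl ⊢; omega) hk]
        have hcount : buf.length + (x :: xs).length + k' - 1
            = (([] : List String).length + xs.length + k' - 1) + k' := by
          simp only [List.length_cons, List.length_nil]; omega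
        rw [hcount, Nat.add_div_right _ hk, List.range_succ_eq_map]
        simp only [List.map_cons, List.map_map]
        have hhead : PySem.Str.join "\n" (buf ++ [x])
            = PySem.Str.join "\n" (((buf ++ x :: xs).drop (k' * 0)).take k') := by
          rw [Nat.mul_zero, List.drop_zero, ← hlenN, List.take_length_add_append]
          simp
        rw [← hhead]
        congr 1
        apply List.map_congr_left
        intro j _
        simp only [Function.comp_apply, List.nil_append]
        congr 2
        rw [List.append_cons buf x xs]
        have hmul : k' * (j + 1) = (buf ++ [x]).length + k' * j := by
          simp only [List.length_append, List.length_cons, List.length_nil]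
          rw [← hlenN]; ring
        rw [hmul, List.drop_length_add_append]
      · have hlenN : buf.length + 1 ≠ k' := by
          intro h
          apply hlen
          simp only [List.length_append, List.length_cons, List.length_nil]
          exact_mod_cast congrArg (fun m : Nat => (m : Int)) h
        rw [if_neg hlen]
        have hb' : (buf ++ [x]).length < k' := by simp; omega
        rw [ih xs (buf ++ [x]) (by simp at hl ⊢; omega) hb']
        have h1 : (buf ++ [x]).length + xs.length + k' - 1
            = buf.length + (x :: xs).length + k' - 1 := by simp; omega
        rw [h1, ← List.append_cons buf x xs]

-- ===== VERDICT (by name: the statement is the Claim_ definition above) =====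
theorem parse_log_file_spec : Claim_equal_parse_log_file := by
  intro log_text max_chunk_lines _ hpre
  unfold Pre_parse_log_file at hpre
  unfold Spec_parse_log_file parse_log_file parse_log_file_alt
  have hkeep0 : (fun line => decide (PySem.Str.strip line ≠ "")
      && !PySem.Str.startswith (PySem.Str.strip line) "#") = pvKeep := rfl
  rcases hpre with hpre | ⟨hfilt, hmz⟩
  case inr =>
    rw [hkeep0] at hfilt
    have hB := pvB_fold max_chunk_lines (PySem.Str.splitlines log_text) [] []
    dsimp only at hB ⊢
    rw [hkeep0, hB, hfilt]
    simp [pvChunkAux, PySem.List.pyRange]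
  have hcast : ((max_chunk_lines.toNat : Int)) = max_chunk_lines :=
    Int.toNat_of_nonneg (by omega)
  have hkpos : 0 < max_chunk_lines.toNat := by omega
  rw [← hcast]
  have hkeep : (fun line => decide (PySem.Str.strip line ≠ "")
      && !PySem.Str.startswith (PySem.Str.strip line) "#") = pvKeep := rfl
  dsimp only
  rw [hkeep]
  have hB := pvB_fold ((max_chunk_lines.toNat : Int)) (PySem.Str.splitlines log_text) [] []
  dsimp only at hB
  rw [hB]
  rw [PySem.List.foldl_append_singleton_eq_map]
  rw [pvChunkAux_eq_map max_chunk_lines.toNat hkpos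
      ((PySem.Str.splitlines log_text).filter pvKeep).length
      ((PySem.Str.splitlines log_text).filter pvKeep) [] (le_refl _) hkpos]
  rw [PySem.List.pyRange_of_pos 0 _ (by exact_mod_cast hkpos)]
  rw [List.map_map]
  set k' : Nat := max_chunk_lines.toNat
  set clean : List String := (PySem.Str.splitlines log_text).filter pvKeep with hcl
  simp only [List.nil_append, List.length_nil, List.nil_append, Nat.zero_add]
  -- chunk counts agree
  have hN : (if (0:Int) < (clean.length : Int) then
        (((clean.length : Int) - 0 + (k' : Int) - 1) / (k' : Int)).toNat else 0)
      = (clean.length + k' - 1) / k' := by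
    by_cases h0 : clean.length = 0
    · rw [h0]
      have h1 : (k' - 1) / k' = 0 := Nat.div_eq_of_lt (by omega)
      simp [h1]
    · have hlt : (0:Int) < (clean.length : Int) := by exact_mod_cast Nat.pos_of_ne_zero h0
      rw [if_pos hlt]
      have e1 : (clean.length : Int) - 0 + (k' : Int) - 1
          = ((clean.length + k' - 1 : Nat) : Int) := by push_cast; omega
      rw [e1, ← Int.natCast_ediv]
      exact Int.toNat_natCast _
  rw [hN]
  apply List.map_congr_left
  intro j _
  have e2 : (0 : Int) + (k' : Int) * (j : Int) = ((k' * j : Nat) : Int) := by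
    push_cast; ring
  simp only [Function.comp_apply]
  rw [e2, PySem.List.slice_natCast_add clean (k' * j) k']
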